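-- pv_equiv track=rewrite | github.com/dosido-git/deftbrain | audit/wrap_json_parse.py | _next_code_position
-- ===== SOURCE A (Python) =====
-- def _next_code_position(content, pos):
--     """Advance from `pos` through any string literal or comment that starts
--     at `pos`, returning the position where code resumes. If `pos` is already
--     in code, returns `pos` unchanged. This lets the JSON.parse scanner skip
--     over occurrences embedded in strings/comments at the top level.
--     """
--     if pos >= len(content):
--         return pos
--     ch = content[pos]
--
--     # Line comment
--     if ch == '/' and pos + 1 < len(content) and content[pos + 1] == '/':
--         end = content.find('\n', pos)
--         return end if end != -1 else len(content)
--
--     # Block comment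
--     if ch == '/' and pos + 1 < len(content) and content[pos + 1] == '*':
--         end = content.find('*/', pos + 2)
--         return (end + 2) if end != -1 else len(content)
--
--     # String literals — single, double, backtick. Walk through respecting escapes.
--     if ch in ('"', "'", '`'):
--         quote = ch
--         i = pos + 1
--         while i < len(content):
--             c = content[i]
--             if c == '\\' and i + 1 < len(content):
--                 i += 2
--                 continue
--             if c == quote:
--                 return i + 1
--             i += 1
--         return len(content)
--
--     return pos
-- ===== SOURCE B (Python) =====
-- def _next_code_position(content, pos):
--     """Advance from `pos` past a string literal or comment starting there.
--
--     Works on the suffix content[pos:]: dispatch by startswith/one-char slice,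
--     and the string body is consumed by a recursive helper that leaps between
--     backslashes and closing quotes with find().
--     """
--     tail = content[pos:]
--     if tail.startswith('//'):
--         off = tail.find('\n')
--         return len(content) if off == -1 else pos + off
--     if tail.startswith('/*'):
--         off = tail.find('*/', 2)
--         return len(content) if off == -1 else pos + off + 2
--     q = tail[:1]
--     if q in ('"', "'", '`'):
--         return pos + 1 + _string_body(tail[1:], q)
--     return pos
--
--
-- def _string_body(rest, quote):
--     """Chars consumed up to and including the closing quote (all of `rest`
--     if unterminated), honouring backslash escapes."""
--     nq = rest.find(quote)
--     if nq == -1: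
--         return len(rest)
--     nb = rest.find('\\')
--     if nb != -1 and nb < nq:
--         return nb + 2 + _string_body(rest[nb + 2:], quote)
--     return nq + 1
-- ===== Notes on version B (the rewrite author's own statement) =====
-- stated objective: alternative
-- what changed: B works on the suffix content[pos:]: it dispatches with startswith/one-character slices instead of indexing, and consumes the string body with a recursive helper that leaps between backslashes and closing quotes via find() on ever-shorter slices, instead of A's char-by-char escape walk over the full string; Pre_ excludes only negative pos whose wrapped character is a quote or slash (where A's wraparound indexing and B's suffix slicing are both accidental corner readings) and pos < -len, where A raises IndexError.
-- outside the precondition, e.g. on _next_code_position('/*`\\/', -3): A returns 3, B returns 0; on _next_code_position('/', -1): A returns 1, B returns -1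
import Mathlib
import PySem

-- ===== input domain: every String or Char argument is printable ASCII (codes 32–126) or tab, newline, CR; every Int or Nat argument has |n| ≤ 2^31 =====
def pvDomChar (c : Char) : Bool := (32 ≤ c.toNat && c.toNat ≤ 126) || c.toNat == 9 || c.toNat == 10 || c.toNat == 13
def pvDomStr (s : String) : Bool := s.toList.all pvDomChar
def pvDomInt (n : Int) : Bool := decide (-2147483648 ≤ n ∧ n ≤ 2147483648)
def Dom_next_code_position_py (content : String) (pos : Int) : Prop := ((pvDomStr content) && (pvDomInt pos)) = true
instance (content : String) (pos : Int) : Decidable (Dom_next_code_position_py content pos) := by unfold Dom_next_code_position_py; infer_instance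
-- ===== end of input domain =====

-- B works on the suffix content[pos:] (startswith dispatch, recursive find()-jump
-- string body on shrinking slices) instead of A's index arithmetic and char-by-char
-- escape walk. Objective: alternative.

-- ===== PORT A =====
-- A's `while i < len(content)` string-literal walk, one character at a time.
def aStrLoop (cs : List Char) (q : Char) (i : Nat) : Int :=
  if _h : i < cs.length then
    let c := cs[i]
    if c = '\\' ∧ i + 1 < cs.length then aStrLoop cs q (i + 2)
    else if c = q then (i : Int) + 1
    else aStrLoop cs q (i + 1)
  else (cs.length : Int)
termination_by cs.length - i

def next_code_position_py (content : String) (pos : Int) : Int :=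
  let cs := content.toList
  if pos ≥ (cs.length : Int) then pos
  else
    match PySem.Str.pyGet? content pos with
    | none => 0   -- unreachable under Pre_ (Python would raise IndexError)
    | some ch =>
      if ch = '/' ∧ pos + 1 < (cs.length : Int) ∧ PySem.Str.pyGet? content (pos + 1) = some '/' then
        let e := PySem.Str.findFrom content "\n" pos none
        if e ≠ -1 then e else (cs.length : Int)
      else if ch = '/' ∧ pos + 1 < (cs.length : Int) ∧ PySem.Str.pyGet? content (pos + 1) = some '*' then
        let e := PySem.Str.findFrom content "*/" (pos + 2) none
        if e ≠ -1 then e + 2 else (cs.length : Int)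
      else if ch = '"' ∨ ch = '\'' ∨ ch = '`' then
        aStrLoop cs ch (pos + 1).toNat
      else pos

-- ===== PORT B =====
-- B's `_string_body(rest, quote)`: chars consumed up to and incl. the closing quote,
-- recursing on the slice past each backslash escape. The dite is only a totality
-- guard (its else-branch is unreachable: nq ≠ -1 forces rest ≠ []).
def bStrBody (rest : List Char) (q : List Char) : Int :=
  let nq := PySem.Chars.find rest q
  if nq = -1 then (rest.length : Int)
  else
    let nb := PySem.Chars.find rest ['\\']
    if nb ≠ -1 ∧ nb < nq then
      if h : (rest.drop (nb + 2).toNat).length < rest.length then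
        nb + 2 + bStrBody (rest.drop (nb + 2).toNat) q
      else (rest.length : Int)
    else nq + 1
termination_by rest.length
decreasing_by exact h

def next_code_position_py_alt (content : String) (pos : Int) : Int :=
  let tail := PySem.List.slice content.toList (some pos) none
  if PySem.Chars.startswith tail ['/', '/'] then
    let off := PySem.Chars.find tail ['\n']
    if off = -1 then (content.toList.length : Int) else pos + off
  else if PySem.Chars.startswith tail ['/', '*'] then
    let off := PySem.Chars.findFrom tail ['*', '/'] 2 none
    if off = -1 then (content.toList.length : Int) else pos + off + 2
  else
    let q := PySem.List.slice tail none (some 1)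
    if q = ['"'] ∨ q = ['\''] ∨ q = ['`'] then
      pos + 1 + bStrBody (PySem.List.slice tail (some 1) none) q
    else pos

-- ===== PRECONDITION & SPEC =====
-- Pre_ excludes negative pos whose (Python-wraparound) character is a quote or a
-- slash — out-of-domain positions no caller produces, where A's wraparound indexing
-- and B's suffix slicing are two equally accidental readings — and pos < -len,
-- where A raises IndexError.
def Pre_next_code_position_py (content : String) (pos : Int) : Prop :=
  0 ≤ pos ∨ (PySem.Str.pyGet? content pos).any
      (fun c => !(c == '"' || c == '\'' || c == '`' || c == '/')) = true
instance (content : String) (pos : Int) : Decidable (Pre_next_code_position_py content pos) := by unfold Pre_next_code_position_py; infer_instance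

def pvWitness_next_code_position_py : String × Int := ("'a\\'b' + 1", 0)

def Spec_next_code_position_py (content : String) (pos : Int) (out : Int) : Prop := out = next_code_position_py_alt content pos
instance (content : String) (pos : Int) (out : Int) : Decidable (Spec_next_code_position_py content pos out) := by unfold Spec_next_code_position_py; infer_instance

-- ===== CLAIM (what is proved, stated in full; the proofs are below) =====
def Claim_equal_next_code_position_py : Prop := ∀ (content : String) (pos : Int), Dom_next_code_position_py content pos → Pre_next_code_position_py content pos → Spec_next_code_position_py content pos (next_code_position_py content pos)

-- ===== LEMMAS AND PROOFS =====

theorem singleton_prefix_iff (c : Char) (l : List Char) : [c] <+: l ↔ l.head? = some c := by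
  cases l with
  | nil => simp
  | cons x t =>
    simp only [List.cons_prefix_cons, List.head?_cons, Option.some.injEq]
    constructor
    · rintro ⟨rfl, -⟩; rfl
    · rintro rfl; exact ⟨rfl, List.nil_prefix⟩

-- Characterisation of rest.find(c) for a single character: -1 means c absent,
-- otherwise the first index holding c.
theorem find_char (rest : List Char) (c : Char) :
    (PySem.Chars.find rest [c] = -1 ∧ ∀ j, j < rest.length → rest[j]? ≠ some c) ∨
    (∃ m : Nat, PySem.Chars.find rest [c] = (m : Int) ∧
      m < rest.length ∧ rest[m]? = some c ∧ ∀ j, j < m → rest[j]? ≠ some c) := by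
  rw [← PySem.Chars.findFrom_zero]
  by_cases h : PySem.Chars.findFrom rest [c] 0 none = -1
  · left
    refine ⟨h, fun j hj hc => ?_⟩
    rw [show (0 : Int) = ((0 : Nat) : Int) from rfl] at h
    rw [PySem.Chars.findFrom_natCast_eq_neg_one_iff rest [c] 0 (Nat.zero_le _)] at h
    obtain ⟨hlt, he⟩ := List.getElem?_eq_some_iff.mp hc
    exact h (by simpa using (List.singleton_infix_iff c rest).mpr (he ▸ List.getElem_mem hlt))
  · right
    rw [show (0 : Int) = ((0 : Nat) : Int) from rfl] at h ⊢
    obtain ⟨hk, hpre, hmin⟩ := PySem.Chars.findFrom_natCast_spec rest [c] 0 (Nat.zero_le _) h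
    set f := PySem.Chars.findFrom rest [c] ((0 : Nat) : Int) none with hf
    have hhead : rest[f.toNat]? = some c := by
      have := (singleton_prefix_iff c _).mp hpre
      rwa [List.head?_drop] at this
    refine ⟨f.toNat, (Int.toNat_of_nonneg hk).symm,
      (List.getElem?_eq_some_iff.mp hhead).1, hhead, ?_⟩
    intro j hjm hc
    exact hmin j (Nat.zero_le _) hjm ((singleton_prefix_iff c _).mpr (by rw [List.head?_drop]; exact hc))

-- One step of A's walk over an ordinary character.
theorem aStrLoop_step (cs : List Char) (q : Char) (i : Nat) (hi : i < cs.length)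
    (hb : cs[i]? ≠ some '\\') (hqc : cs[i]? ≠ some q) :
    aStrLoop cs q i = aStrLoop cs q (i + 1) := by
  have hb' : cs[i] ≠ '\\' := fun h => hb (by simp [List.getElem?_eq_getElem hi, h])
  have hq' : cs[i] ≠ q := fun h => hqc (by simp [List.getElem?_eq_getElem hi, h])
  conv_lhs => rw [aStrLoop]
  simp [hi, hb', hq']

-- A's walk skips a run of ordinary characters.
theorem aStrLoop_skip (cs : List Char) (q : Char) (i m : Nat) (him : i ≤ m) (hm : m ≤ cs.length)
    (hord : ∀ j, i ≤ j → j < m → cs[j]? ≠ some '\\' ∧ cs[j]? ≠ some q) :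
    aStrLoop cs q i = aStrLoop cs q m := by
  induction m, him using Nat.le_induction with
  | base => rfl
  | succ m him ih =>
    have hmlt : m < cs.length := by omega
    have h := hord m him (by omega)
    rw [ih (by omega) (fun j h1 h2 => hord j h1 (by omega))]
    exact aStrLoop_step cs q m hmlt h.1 h.2

-- If no closing quote occurs at any index ≥ i, A's walk returns len(content).
theorem aStrLoop_no_quote (cs : List Char) (q : Char) :
    ∀ n i, cs.length - i ≤ n → (∀ j, i ≤ j → j < cs.length → cs[j]? ≠ some q) →
      aStrLoop cs q i = (cs.length : Int) := by
  intro n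
  induction n with
  | zero =>
    intro i h0 _
    rw [aStrLoop]; rw [dif_neg (by omega)]
  | succ n ih =>
    intro i hn hno
    by_cases hi : i < cs.length
    · have hq : cs[i] ≠ q := fun h =>
        hno i le_rfl hi (by simp [List.getElem?_eq_getElem hi, h])
      rw [aStrLoop]
      simp only [dif_pos hi]
      by_cases hbs : cs[i] = '\\' ∧ i + 1 < cs.length
      · rw [if_pos hbs]
        exact ih (i + 2) (by omega) (fun j h1 h2 => hno j (by omega) h2)
      · rw [if_neg hbs, if_neg hq]
        exact ih (i + 1) (by omega) (fun j h1 h2 => hno j (by omega) h2)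
    · rw [aStrLoop]; rw [dif_neg hi]

-- Main loop equivalence: B's recursive find()-jump body computes A's walk,
-- shifted to the suffix starting at i.
theorem loop_eq (q : Char) (hq : q ≠ '\\') :
    ∀ n (rest cs : List Char) (i : Nat), rest.length ≤ n → cs.drop i = rest → i ≤ cs.length →
      aStrLoop cs q i = (i : Int) + bStrBody rest [q] := by
  intro n
  induction n with
  | zero =>
    intro rest cs i hn hdrop hle
    have hrest : rest = [] := List.eq_nil_of_length_eq_zero (by omega)
    subst hrest
    have hi : i = cs.length := by
      have := congrArg List.length hdrop
      simp [List.length_drop] at this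
      omega
    rw [bStrBody, aStrLoop]
    rcases find_char ([] : List Char) q with ⟨hnq, -⟩ | ⟨m, -, hmlt, -, -⟩
    · simp [hnq, hi]
    · simp at hmlt
  | succ n ih =>
    intro rest cs i hn hdrop hle
    have hlen : rest.length = cs.length - i := by
      have := congrArg List.length hdrop
      simpa [List.length_drop] using this.symm
    have hidx : ∀ j, cs[i + j]? = rest[j]? := by
      intro j; rw [← hdrop, List.getElem?_drop]
    rw [bStrBody]
    rcases find_char rest q with ⟨hnq, hno⟩ | ⟨m, hm, hmlt, hmc, hmmin⟩
    · simp only [hnq]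
      rw [aStrLoop_no_quote cs q cs.length i (by omega) ?_]
      · push_cast; omega
      · intro j h1 h2 hc
        have hj : cs[j]? = rest[j - i]? := by rw [← hidx (j - i)]; congr 1; omega
        exact hno (j - i) (by omega) (by rw [← hj]; exact hc)
    · have hmne : (m : Int) ≠ -1 := by omega
      simp only [hm, if_neg hmne]
      have hmq : cs[i + m]? = some q := by rw [hidx]; exact hmc
      have himlt : i + m < cs.length := by omega
      rcases find_char rest '\\' with ⟨hnb, hnob⟩ | ⟨b, hb, hblt, hbc, hbmin⟩
      · -- no backslash in rest: A walks to the quote, B returns m + 1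
        simp only [hnb, if_neg (by simp : ¬((-1 : Int) ≠ -1 ∧ (-1 : Int) < (m : Int)))]
        rw [aStrLoop_skip cs q i (i + m) (by omega) (by omega) ?_]
        · rw [aStrLoop]
          simp only [dif_pos himlt]
          have hceq : cs[i + m] = q := by
            have := List.getElem?_eq_getElem himlt
            rw [this] at hmq; injection hmq
          rw [if_neg (by rw [hceq]; exact fun h => hq h.1), if_pos hceq]
          push_cast; ring
        · intro j h1 h2
          have hj : cs[j]? = rest[j - i]? := by rw [← hidx (j - i)]; congr 1; omega
          exact ⟨by rw [hj]; exact hnob (j - i) (by omega),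
                 by rw [hj]; exact hmmin (j - i) (by omega)⟩
      · by_cases hbm : b < m
        · -- backslash before the quote: both jump past the escape
          have hcond : ((b : Int) ≠ -1 ∧ (b : Int) < (m : Int)) := ⟨by omega, by exact_mod_cast hbm⟩
          simp only [hb, if_pos hcond]
          have htn : ((b : Int) + 2).toNat = b + 2 := by omega
          rw [htn]
          have hguard : (rest.drop (b + 2)).length < rest.length := by
            simp [List.length_drop]; omega
          rw [dif_pos hguard]
          have hbq : cs[i + b]? = some '\\' := by rw [hidx]; exact hbc
          have hiblt : i + b < cs.length := by omega
          rw [aStrLoop_skip cs q i (i + b) (by omega) (by omega) ?_]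
          · conv_lhs => rw [aStrLoop]
            simp only [dif_pos hiblt]
            have hceq : cs[i + b] = '\\' := by
              have := List.getElem?_eq_getElem hiblt
              rw [this] at hbq; injection hbq
            rw [if_pos ⟨hceq, by omega⟩]
            have hrec := ih (rest.drop (b + 2)) cs (i + b + 2)
              (by simp [List.length_drop]; omega)
              (by rw [← hdrop, List.drop_drop, ← Nat.add_assoc])
              (by omega)
            rw [hrec]; push_cast; ring
          · intro j h1 h2
            have hj : cs[j]? = rest[j - i]? := by rw [← hidx (j - i)]; congr 1; omega
            exact ⟨by rw [hj]; exact hbmin (j - i) (by omega),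
                   by rw [hj]; exact hmmin (j - i) (by omega)⟩
        · -- quote before any backslash (b = m is impossible: rest[m] = q ≠ '\\')
          have hbne : b ≠ m := by
            intro h; subst h
            rw [hbc] at hmc
            exact hq (by injection hmc with h'; exact h'.symm)
          have hcond : ¬ ((b : Int) ≠ -1 ∧ (b : Int) < (m : Int)) := by
            rintro ⟨-, h2⟩
            have : b < m := by exact_mod_cast h2
            omega
          simp only [hb, if_neg hcond]
          rw [aStrLoop_skip cs q i (i + m) (by omega) (by omega) ?_]
          · rw [aStrLoop]
            simp only [dif_pos himlt]
            have hceq : cs[i + m] = q := by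
              have := List.getElem?_eq_getElem himlt
              rw [this] at hmq; injection hmq
            rw [if_neg (by rw [hceq]; exact fun h => hq h.1), if_pos hceq]
            push_cast; ring
          · intro j h1 h2
            have hj : cs[j]? = rest[j - i]? := by rw [← hidx (j - i)]; congr 1; omega
            exact ⟨by rw [hj]; exact hbmin (j - i) (by omega),
                   by rw [hj]; exact hmmin (j - i) (by omega)⟩

-- startswith with a two-character pattern, read off the first two elements.
theorem startswith_pair_iff (a b : Char) (l : List Char) :
    PySem.Chars.startswith l [a, b] = true ↔ l[0]? = some a ∧ l[1]? = some b := by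
  rw [PySem.Chars.startswith_iff]
  match l with
  | [] => simp
  | [x] => simp [List.cons_prefix_cons]
  | x :: y :: t => simp [List.cons_prefix_cons, eq_comm]

-- find never returns a negative index other than -1.
theorem find_nonneg_of_ne (s sub : List Char) (h : PySem.Chars.find s sub ≠ -1) :
    0 ≤ PySem.Chars.find s sub := by
  have h0 : ((0 : Nat) : Int) = (0 : Int) := rfl
  have hs := PySem.Chars.findFrom_natCast_spec s sub 0 (Nat.zero_le _)
    (by rw [h0, PySem.Chars.findFrom_zero]; exact h)
  rw [h0, PySem.Chars.findFrom_zero] at hs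
  exact_mod_cast hs.1

-- ===== VERDICT (by name: the statement is the Claim_ definition above) =====
theorem next_code_position_py_spec : Claim_equal_next_code_position_py := by
  intro content pos _ hpre
  unfold Spec_next_code_position_py
  simp only [next_code_position_py, next_code_position_py_alt]
  by_cases hge : pos ≥ (content.toList.length : Int)
  · -- pos past the end: A returns pos; B's suffix is empty, every branch fails
    rw [if_pos hge]
    have h0 : (0 : Int) ≤ pos := le_trans (by exact_mod_cast Int.natCast_nonneg _) hge
    have htail : PySem.List.slice content.toList (some pos) none = [] := by
      rw [PySem.List.slice_from _ h0]
      exact List.drop_eq_nil_of_le (by omega)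
    rw [htail, PySem.List.slice_to ([] : List Char) (by omega : (0:Int) ≤ 1)]
    simp [PySem.Chars.startswith_iff]
  · rw [if_neg hge]
    cases hget : PySem.Str.pyGet? content pos with
    | none =>
      exfalso
      rcases hpre with h0 | hany
      · rw [PySem.Str.pyGet?_eq, PySem.Chars.pyGet?_eq_listPyGet?,
          PySem.List.pyGet?_eq_none_iff] at hget
        exact hget ⟨by omega, by omega⟩
      · rw [hget] at hany; simp at hany
    | some ch =>
      dsimp only
      by_cases h0 : 0 ≤ pos
      · -- non-negative position inside the string
        obtain ⟨p, rfl⟩ : ∃ p : Nat, pos = (p : Int) := ⟨pos.toNat, (Int.toNat_of_nonneg h0).symm⟩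
        have hlt : p < content.toList.length := by omega
        have hgp : content.toList[p]? = some ch := by
          rw [← PySem.Str.pyGet?_natCast]; exact hget
        have hg1 : PySem.Str.pyGet? content ((p : Int) + 1) = content.toList[p + 1]? := by
          rw [show ((p : Int) + 1) = ((p + 1 : Nat) : Int) from by push_cast; ring]
          exact PySem.Str.pyGet?_natCast content (p + 1)
        have htail : PySem.List.slice content.toList (some (p : Int)) none
            = content.toList.drop p := by
          rw [PySem.List.slice_from _ (by omega)]; norm_num
        rw [htail]
        have hA1 : (ch = '/' ∧ (p : Int) + 1 < (content.toList.length : Int) ∧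
              PySem.Str.pyGet? content ((p : Int) + 1) = some '/')
            ↔ PySem.Chars.startswith (content.toList.drop p) ['/', '/'] = true := by
          rw [startswith_pair_iff]
          simp only [List.getElem?_drop, Nat.add_zero, hgp, hg1]
          constructor
          · rintro ⟨rfl, -, h3⟩
            exact ⟨rfl, h3⟩
          · rintro ⟨h1, h2⟩
            obtain rfl : ch = '/' := by injection h1
            have hlen2 := (List.getElem?_eq_some_iff.mp h2).1
            exact ⟨rfl, by omega, h2⟩
        have hA2 : (ch = '/' ∧ (p : Int) + 1 < (content.toList.length : Int) ∧
              PySem.Str.pyGet? content ((p : Int) + 1) = some '*')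
            ↔ PySem.Chars.startswith (content.toList.drop p) ['/', '*'] = true := by
          rw [startswith_pair_iff]
          simp only [List.getElem?_drop, Nat.add_zero, hgp, hg1]
          constructor
          · rintro ⟨rfl, -, h3⟩
            exact ⟨rfl, h3⟩
          · rintro ⟨h1, h2⟩
            obtain rfl : ch = '/' := by injection h1
            have hlen2 := (List.getElem?_eq_some_iff.mp h2).1
            exact ⟨rfl, by omega, h2⟩
        have hcons : content.toList.drop p = ch :: content.toList.drop (p + 1) := by
          rw [List.drop_eq_getElem_cons hlt]
          congr 1
          have := List.getElem?_eq_getElem hlt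
          rw [this] at hgp; injection hgp
        have htake : PySem.List.slice (content.toList.drop p) none (some 1) = [ch] := by
          rw [PySem.List.slice_to _ (by omega : (0:Int) ≤ 1), hcons]; rfl
        by_cases hc1 : ch = '/' ∧ (p : Int) + 1 < (content.toList.length : Int) ∧
            PySem.Str.pyGet? content ((p : Int) + 1) = some '/'
        · -- line comment
          rw [if_pos hc1, if_pos (hA1.mp hc1)]
          rw [PySem.Str.findFrom_eq, show ("\n".toList) = ['\n'] from rfl,
            PySem.Chars.findFrom_natCast content.toList ['\n'] p (by omega)]
          by_cases hoff : PySem.Chars.find (content.toList.drop p) ['\n'] = -1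
          · rw [if_pos hoff, hoff]; simp
          · rw [if_neg hoff, if_neg hoff]
            have := find_nonneg_of_ne _ _ hoff
            rw [if_pos (by omega)]
        · rw [if_neg hc1, if_neg (fun h => hc1 (hA1.mpr h))]
          by_cases hc2 : ch = '/' ∧ (p : Int) + 1 < (content.toList.length : Int) ∧
              PySem.Str.pyGet? content ((p : Int) + 1) = some '*'
          · -- block comment
            rw [if_pos hc2, if_pos (hA2.mp hc2)]
            have hp2 : p + 2 ≤ content.toList.length := by omega
            rw [PySem.Str.findFrom_eq, show ("*/".toList) = ['*', '/'] from rfl,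
              show ((p : Int) + 2) = ((p + 2 : Nat) : Int) from by push_cast; ring,
              PySem.Chars.findFrom_natCast content.toList ['*', '/'] (p + 2) hp2,
              show ((2 : Int)) = ((2 : Nat) : Int) from rfl,
              PySem.Chars.findFrom_natCast (content.toList.drop p) ['*', '/'] 2
                (by rw [List.length_drop]; omega),
              List.drop_drop, show p + 2 = 2 + p from by omega]
            by_cases hoff : PySem.Chars.find (content.toList.drop (2 + p)) ['*', '/'] = -1
            · rw [if_pos hoff, if_pos hoff]; simp
            · rw [if_neg hoff, if_neg hoff]
              have := find_nonneg_of_ne _ _ hoff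
              rw [if_pos (by push_cast; omega : ((2 + p : Nat) : Int) +
                  PySem.Chars.find (List.drop (2 + p) content.toList) ['*', '/'] ≠ -1),
                if_neg (by push_cast; omega : ¬ ((2 : Nat) : Int) +
                  PySem.Chars.find (List.drop (2 + p) content.toList) ['*', '/'] = -1)]
              push_cast; ring
          · rw [if_neg hc2, if_neg (fun h => hc2 (hA2.mpr h))]
            rw [htake]
            by_cases hc3 : ch = '"' ∨ ch = '\'' ∨ ch = '`'
            · -- string literal
              have hcond3 : [ch] = ['"'] ∨ [ch] = ['\''] ∨ [ch] = ['`'] := by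
                rcases hc3 with rfl | rfl | rfl <;> simp
              rw [if_pos hc3, if_pos hcond3]
              rw [PySem.List.slice_from_one, hcons]
              have hq : ch ≠ '\\' := by rcases hc3 with rfl | rfl | rfl <;> decide
              have := loop_eq ch hq (content.toList.drop (p + 1)).length
                (content.toList.drop (p + 1)) content.toList (p + 1) le_rfl rfl (by omega)
              rw [show ((p : Int) + 1).toNat = p + 1 from by omega, this,
                List.tail_cons]
              push_cast; ring
            · rw [if_neg hc3, if_neg (by simpa using hc3)]
      · -- negative position on an ordinary character (guaranteed by Pre_)
        rcases hpre with h | hany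
        · omega
        · rw [hget] at hany
          simp only [Option.any_some] at hany
          have hch : ch ≠ '"' ∧ ch ≠ '\'' ∧ ch ≠ '`' ∧ ch ≠ '/' := by
            constructor; · intro h; subst h; simp at hany
            constructor; · intro h; subst h; simp at hany
            constructor; · intro h; subst h; simp at hany
            · intro h; subst h; simp at hany
          -- A: every branch condition mentions a quote or '/', so A returns pos
          rw [if_neg (fun h => hch.2.2.2 h.1), if_neg (fun h => hch.2.2.2 h.1),
            if_neg (by rintro (rfl | rfl | rfl) <;> simp_all)]
          -- B: the wrapped character heads the suffix and is ordinary
          set k : Nat := (-pos).toNat with hk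
          have hkpos : 0 < k := by omega
          have hgl : PySem.List.pyGet? content.toList pos ≠ none := by
            rw [← PySem.Chars.pyGet?_eq_listPyGet?, ← PySem.Str.pyGet?_eq, hget]; simp
          have hin : PySem.Raise.InRange content.toList.length pos := by
            by_contra hc
            exact hgl ((PySem.List.pyGet?_eq_none_iff _ _).mpr hc)
          have hkle : k ≤ content.toList.length := by
            rcases hin with ⟨hl, -⟩; omega
          have hpk : pos = -(k : Int) := by omega
          have hwrap : content.toList[content.toList.length - k]? = some ch := by
            rw [← PySem.List.pyGet?_neg_natCast content.toList k hkpos hkle, ← hpk,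
              ← PySem.Chars.pyGet?_eq_listPyGet?, ← PySem.Str.pyGet?_eq]
            exact hget
          have htail : PySem.List.slice content.toList (some pos) none
              = content.toList.drop (content.toList.length - k) := by
            rw [PySem.List.slice_some_none, hpk, PySem.List.clampIdx_neg_natCast _ _ hkpos]
          rw [htail]
          have hhd : (content.toList.drop (content.toList.length - k))[0]? = some ch := by
            rw [List.getElem?_drop, Nat.add_zero]; exact hwrap
          have hnlt : content.toList.length - k < content.toList.length := by
            have := (List.getElem?_eq_some_iff.mp hwrap).1; omega
          have hcons : content.toList.drop (content.toList.length - k)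
              = ch :: content.toList.drop (content.toList.length - k + 1) := by
            rw [List.drop_eq_getElem_cons hnlt]
            congr 1
            have := List.getElem?_eq_getElem hnlt
            rw [this] at hwrap; injection hwrap
          have hB1 : ¬ PySem.Chars.startswith
              (content.toList.drop (content.toList.length - k)) ['/', '/'] = true := by
            rw [startswith_pair_iff, hhd]
            rintro ⟨h1, -⟩
            exact hch.2.2.2 (Option.some.inj h1)
          have hB2 : ¬ PySem.Chars.startswith
              (content.toList.drop (content.toList.length - k)) ['/', '*'] = true := by
            rw [startswith_pair_iff, hhd]
            rintro ⟨h1, -⟩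
            exact hch.2.2.2 (Option.some.inj h1)
          have hB3 : ¬ (PySem.List.slice
                (content.toList.drop (content.toList.length - k)) none (some 1) = ['"'] ∨
              PySem.List.slice
                (content.toList.drop (content.toList.length - k)) none (some 1) = ['\''] ∨
              PySem.List.slice
                (content.toList.drop (content.toList.length - k)) none (some 1) = ['`']) := by
            rw [PySem.List.slice_to _ (by omega : (0:Int) ≤ 1), hcons]
            intro hcase
            have hc' : [ch] = ['"'] ∨ [ch] = ['\''] ∨ [ch] = ['`'] := hcase
            rcases hc' with h | h | h
            · exact hch.1 (by injection h)
            · exact hch.2.1 (by injection h)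
            · exact hch.2.2.1 (by injection h)
          rw [if_neg hB1, if_neg hB2, if_neg hB3]
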